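-- pv_equiv track=rewrite | github.com/epsilon-phase/dbscan | balltree.py | dominant_axis
-- ===== SOURCE A (Python) =====
-- def dominant_axis(points):
--     dimensions = len(points[0])
--     min_point = [float('inf')]*dimensions
--     max_point = [float('-inf')]*dimensions
--     for i in points:
--         for c in range(dimensions):
--             min_point[c] = min(min_point[c], i[c])
--             max_point[c] = max(max_point[c], i[c])
--     biggest_axis = 0
--     biggest_diff = 0
--     for axis, (i, j) in enumerate(zip(min_point, max_point)):
--         diff = j - i
--         if diff > biggest_diff:
--             biggest_axis = axis
--             biggest_diff = diff
--     return biggest_axis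
-- ===== SOURCE B (Python) =====
-- def dominant_axis(points):
--     dimensions = len(points[0])
--     diffs = [max(p[c] for p in points) - min(p[c] for p in points)
--              for c in range(dimensions)]
--     biggest_axis = 0
--     biggest_diff = 0
--     for axis, diff in enumerate(diffs):
--         if diff > biggest_diff:
--             biggest_axis = axis
--             biggest_diff = diff
--     return biggest_axis
-- ===== Notes on version B (the rewrite author's own statement) =====
-- stated objective: simpler
-- what changed: Replaced the fused point-major loop that threads mutable min/max vectors initialized to +-inf with a column-major comprehension computing max(col)-min(col) per axis via the built-ins, followed by the same first-occurrence argmax loop.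
import Mathlib
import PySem

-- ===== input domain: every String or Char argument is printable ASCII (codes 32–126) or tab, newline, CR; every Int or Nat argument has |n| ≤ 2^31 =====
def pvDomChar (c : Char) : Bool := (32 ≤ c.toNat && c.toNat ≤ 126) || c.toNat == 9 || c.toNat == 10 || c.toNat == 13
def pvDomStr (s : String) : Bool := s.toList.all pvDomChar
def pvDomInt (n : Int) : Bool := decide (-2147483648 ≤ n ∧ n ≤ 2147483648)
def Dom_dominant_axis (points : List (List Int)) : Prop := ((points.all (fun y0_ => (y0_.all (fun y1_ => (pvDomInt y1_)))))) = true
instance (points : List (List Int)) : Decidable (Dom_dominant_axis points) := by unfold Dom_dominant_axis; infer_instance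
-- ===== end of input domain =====

-- B computes per-axis ranges column-major with built-in max/min instead of A's fused
-- point-major loop over ±inf-initialized min/max vectors (objective: simpler).


-- ===== PORT A =====
-- i[c] (raises only outside Pre_, where c < i.length always holds)
def pvColV (i : List Int) (c : Nat) : Int := (PySem.List.pyGet? i (c : Int)).getD 0

-- one pass of A's outer loop: for c in range(dimensions), update min_point[c]/max_point[c].
-- float('inf')/float('-inf') are modeled exactly by `none`: min(inf, v) = v, max(-inf, v) = v.
def pvStepA (dims : Nat) (st : List (Option Int) × List (Option Int)) (i : List Int) :
    List (Option Int) × List (Option Int) :=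
  ((List.range dims).map (fun c =>
      some (match st.1.getD c none with
            | none => pvColV i c
            | some m => min m (pvColV i c))),
   (List.range dims).map (fun c =>
      some (match st.2.getD c none with
            | none => pvColV i c
            | some m => max m (pvColV i c))))

def dominant_axis (points : List (List Int)) : Int :=
  let dims := (points.headD []).length   -- len(points[0]); IndexError on [] excluded by Pre_
  let mm := points.foldl (pvStepA dims) (List.replicate dims none, List.replicate dims none)
  ((PySem.List.enumerate (mm.1.zip mm.2) 0).foldl
    (fun (acc : Int × Int) x =>
      match x.2 with
      | (some i, some j) => if j - i > acc.2 then (x.1, j - i) else acc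
      | _ => acc)     -- none entries occur only for empty `points`, excluded by Pre_
    (0, 0)).1

-- ===== PORT B =====
def dominant_axis_alt (points : List (List Int)) : Int :=
  let dims := (points.headD []).length
  let diffs := (List.range dims).map (fun c : Nat =>
    let col := points.map (fun p => (PySem.List.pyGet? p (c : Int)).getD 0)
    ((PySem.List.max? col (fun v => v)).getD 0) - ((PySem.List.min? col (fun v => v)).getD 0))
  ((PySem.List.enumerate diffs 0).foldl
    (fun (acc : Int × Int) x => if x.2 > acc.2 then (x.1, x.2) else acc)
    (0, 0)).1

-- ===== PRECONDITION & SPEC =====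
-- Pre_ excludes exactly the inputs where A raises IndexError: empty `points`
-- (points[0]) and a point shorter than points[0] (i[c]); B raises there too.
def Pre_dominant_axis (points : List (List Int)) : Prop :=
  points ≠ [] ∧ ∀ p ∈ points, (points.headD []).length ≤ p.length
instance (points : List (List Int)) : Decidable (Pre_dominant_axis points) := by
  unfold Pre_dominant_axis; infer_instance

def pvWitness_dominant_axis : List (List Int) := [[1, 2], [3, 10]]

def Spec_dominant_axis (points : List (List Int)) (out : Int) : Prop := out = dominant_axis_alt points
instance (points : List (List Int)) (out : Int) : Decidable (Spec_dominant_axis points out) := by unfold Spec_dominant_axis; infer_instance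

-- ===== CLAIM (what is proved, stated in full; the proofs are below) =====
def Claim_equal_dominant_axis : Prop := ∀ (points : List (List Int)), Dom_dominant_axis points → Pre_dominant_axis points → Spec_dominant_axis points (dominant_axis points)

-- ===== LEMMAS AND PROOFS =====

-- A's point-major fold, started from index-maps, stays an index-map of per-column folds.
theorem pv_foldA (dims : Nat) (pts : List (List Int)) (f g : Nat → Option Int) :
    pts.foldl (pvStepA dims) ((List.range dims).map f, (List.range dims).map g)
    = ((List.range dims).map (fun c =>
         pts.foldl (fun a p => some (match a with
            | none => pvColV p c | some m => min m (pvColV p c))) (f c)),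
       (List.range dims).map (fun c =>
         pts.foldl (fun a p => some (match a with
            | none => pvColV p c | some m => max m (pvColV p c))) (g c))) := by
  induction pts generalizing f g with
  | nil => rfl
  | cons i pts ih =>
    have hstep : pvStepA dims ((List.range dims).map f, (List.range dims).map g) i
        = ((List.range dims).map (fun c => some (match f c with
              | none => pvColV i c | some m => min m (pvColV i c))),
           (List.range dims).map (fun c => some (match g c with
              | none => pvColV i c | some m => max m (pvColV i c)))) := by
      unfold pvStepA
      refine congrArg₂ Prod.mk ?_ ?_ <;>
        refine List.map_congr_left (fun c hc => ?_) <;>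
        simp [List.mem_range.mp hc]
    simp only [List.foldl_cons, hstep, ih]

-- once the accumulator is `some`, A's per-column fold is the plain running min/max
theorem pv_fold_some_min (pts : List (List Int)) (c : Nat) (m : Int) :
    pts.foldl (fun a p => some (match a with
        | none => pvColV p c | some m => min m (pvColV p c))) (some m)
    = some (pts.foldl (fun m p => min m (pvColV p c)) m) := by
  induction pts generalizing m with
  | nil => rfl
  | cons i pts ih => simp [List.foldl_cons, ih]

theorem pv_fold_some_max (pts : List (List Int)) (c : Nat) (m : Int) :
    pts.foldl (fun a p => some (match a with
        | none => pvColV p c | some m => max m (pvColV p c))) (some m)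
    = some (pts.foldl (fun m p => max m (pvColV p c)) m) := by
  induction pts generalizing m with
  | nil => rfl
  | cons i pts ih => simp [List.foldl_cons, ih]

theorem pv_enumerate_append {α : Type} (l1 l2 : List α) (s : Int) :
    PySem.List.enumerate (l1 ++ l2) s
    = PySem.List.enumerate l1 s ++ PySem.List.enumerate l2 (s + l1.length) := by
  induction l1 generalizing s with
  | nil => simp [PySem.List.enumerate_nil]
  | cons x t ih =>
    simp [PySem.List.enumerate_cons, ih]
    ring_nf

theorem pv_enumerate_map_range {α : Type} (n : Nat) (h : Nat → α) :
    PySem.List.enumerate ((List.range n).map h) 0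
    = (List.range n).map (fun c : Nat => ((c : Int), h c)) := by
  induction n with
  | zero => rfl
  | succ n ih =>
    simp only [List.range_succ, List.map_append, pv_enumerate_append, ih]
    simp [PySem.List.enumerate_cons, PySem.List.enumerate_nil]


-- ===== VERDICT (by name: the statement is the Claim_ definition above) =====
theorem dominant_axis_spec : Claim_equal_dominant_axis := by
  intro points _ hpre
  obtain ⟨hne, hlen⟩ := hpre
  obtain ⟨q, rest, rfl⟩ : ∃ q rest, points = q :: rest := by
    cases points with
    | nil => exact absurd rfl hne
    | cons q rest => exact ⟨q, rest, rfl⟩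
  unfold Spec_dominant_axis dominant_axis dominant_axis_alt
  simp only [List.headD_cons]
  set dims := q.length with hdims
  -- A's accumulation: replicate = map over range of the constant none
  have hrepl : (List.replicate dims (none : Option Int))
      = (List.range dims).map (fun _ => none) := by
    simp [List.map_const']
  rw [hrepl, pv_foldA]
  -- per-column value of A's fold over q :: rest
  have hmin : ∀ c : Nat,
      (q :: rest).foldl (fun a p => some (match a with
          | none => pvColV p c | some m => min m (pvColV p c))) none
      = some (rest.foldl (fun m p => min m (pvColV p c)) (pvColV q c)) := by
    intro c; simp only [List.foldl_cons]; exact pv_fold_some_min rest c (pvColV q c)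
  have hmax : ∀ c : Nat,
      (q :: rest).foldl (fun a p => some (match a with
          | none => pvColV p c | some m => max m (pvColV p c))) none
      = some (rest.foldl (fun m p => max m (pvColV p c)) (pvColV q c)) := by
    intro c; simp only [List.foldl_cons]; exact pv_fold_some_max rest c (pvColV q c)
  simp only [hmin, hmax]
  -- B's column extrema are the same running folds
  have hcol : ∀ c : Nat,
      (q :: rest).map (fun p => (PySem.List.pyGet? p (c : Int)).getD 0)
      = pvColV q c :: rest.map (fun p => pvColV p c) := by
    intro c; simp [pvColV]
  have hB : ∀ c : Nat,
      ((PySem.List.max? ((q :: rest).map (fun p => (PySem.List.pyGet? p (c : Int)).getD 0)) (fun v => v)).getD 0)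
        - ((PySem.List.min? ((q :: rest).map (fun p => (PySem.List.pyGet? p (c : Int)).getD 0)) (fun v => v)).getD 0)
      = (rest.foldl (fun m p => max m (pvColV p c)) (pvColV q c))
        - (rest.foldl (fun m p => min m (pvColV p c)) (pvColV q c)) := by
    intro c
    rw [hcol c, PySem.List.max?_id_cons, PySem.List.min?_id_cons]
    simp [List.foldl_map]
  -- zip of the two index-maps is the index-map of pairs
  have hzip :
      ((List.range dims).map (fun c => some (rest.foldl (fun m p => min m (pvColV p c)) (pvColV q c)))).zip
      ((List.range dims).map (fun c => some (rest.foldl (fun m p => max m (pvColV p c)) (pvColV q c))))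
      = (List.range dims).map (fun c =>
          (some (rest.foldl (fun m p => min m (pvColV p c)) (pvColV q c)),
           some (rest.foldl (fun m p => max m (pvColV p c)) (pvColV q c)))) := by
    rw [List.zip_map']
  rw [hzip, pv_enumerate_map_range, pv_enumerate_map_range]
  simp only [List.foldl_map, hB]
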